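-- pv_equiv track=rewrite | github.com/mpunkenhofer/aoc2020 | src/day20.py | get_fitting_tiles
-- ===== SOURCE A (Python) =====
-- def tiles_fit(tile_a, tile_b):
--     # looks bad but is constant in n... 8 orientations for 4 edges ... 16 checks at most for one tile
--     for orientation_a in tile_a:
--         for edge_a in orientation_a:
--             for orentation_b in tile_b:
--                 for edge_b in orentation_b:
--                     if edge_a == edge_b:
--                         return True
--
--     return False
--
-- def get_fitting_tiles(edges):
--     fitting_tiles = {}
--     edge_list = list(edges.items())
--
--     for i in range(len(edge_list)):
--         for j in range(i + 1, len(edge_list)):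
--             (tile_a_id, tile_a), (tile_b_id, tile_b) = edge_list[i], edge_list[j]
--
--             if tiles_fit(tile_a, tile_b):
--                 if tile_a_id in fitting_tiles:
--                     fitting_tiles[tile_a_id].append(tile_b_id)
--                 else:
--                     fitting_tiles[tile_a_id] = [tile_b_id]
--
--                 if tile_b_id in fitting_tiles:
--                     fitting_tiles[tile_b_id].append(tile_a_id)
--                 else:
--                     fitting_tiles[tile_b_id] = [tile_a_id]
--
--     return fitting_tiles
-- ===== SOURCE B (Python) =====
-- def get_fitting_tiles(edges):
--     items = list(edges.items())
--     # index every edge string -> set of tile positions that carry it (any orientation)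
--     edge_map = {}
--     for k, (_, tile) in enumerate(items):
--         for orientation in tile:
--             for e in orientation:
--                 edge_map.setdefault(e, set()).add(k)
--     # two tiles fit iff some edge string occurs in both
--     succ = [set() for _ in items]
--     for group in edge_map.values():
--         g = sorted(group)
--         while g:
--             a = g.pop(0)
--             for b in g:
--                 succ[a].add(b)
--     # replay the adjacencies in index order to reproduce dict/list ordering
--     result = {}
--     for i in range(len(items)):
--         for j in sorted(succ[i]):
--             result.setdefault(items[i][0], []).append(items[j][0])
--             result.setdefault(items[j][0], []).append(items[i][0])
--     return result
-- ===== Notes on version B (the rewrite author's own statement) =====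
-- stated objective: faster
-- what changed: B replaces A's all-pairs tiles_fit scan (every edge of tile a compared with every edge of tile b, for every pair of tiles) by a hash index edge-string -> set of tile positions, derives the adjacent index pairs from each shared-edge group, and replays them in index order to reproduce A's dict/list ordering.
import Mathlib
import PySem

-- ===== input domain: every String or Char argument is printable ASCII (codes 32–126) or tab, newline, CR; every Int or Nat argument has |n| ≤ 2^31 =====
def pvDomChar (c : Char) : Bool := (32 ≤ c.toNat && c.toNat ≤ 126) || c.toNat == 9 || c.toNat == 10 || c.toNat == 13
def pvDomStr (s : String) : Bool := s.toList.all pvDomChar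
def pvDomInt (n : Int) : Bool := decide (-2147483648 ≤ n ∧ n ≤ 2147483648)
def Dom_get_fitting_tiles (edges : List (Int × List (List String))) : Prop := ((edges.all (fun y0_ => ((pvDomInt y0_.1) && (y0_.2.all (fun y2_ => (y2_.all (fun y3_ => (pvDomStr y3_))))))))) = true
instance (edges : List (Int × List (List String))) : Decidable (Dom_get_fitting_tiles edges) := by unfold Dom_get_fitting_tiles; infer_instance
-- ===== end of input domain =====

-- B replaces A's all-pairs tiles_fit scan by a hash index edge-string -> tile positions,
-- reads the adjacent index pairs off the shared-edge groups and replays them in index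
-- order to reproduce A's dict/list ordering (objective: faster).

-- ===== PORT A =====
-- tiles_fit: four nested loops with early return True = nested any
def pvTilesFit (tile_a tile_b : List (List String)) : Bool :=
  tile_a.any fun orientation_a =>
    orientation_a.any fun edge_a =>
      tile_b.any fun orentation_b =>
        orentation_b.any fun edge_b => edge_a == edge_b

def get_fitting_tiles (edges : List (Int × List (List String))) : List (Int × List Int) :=
  let edge_list := (PySem.Dict.ofList edges).items
  let n : Int := edge_list.length
  let fitting_tiles : PySem.Dict Int (List Int) :=
    (PySem.List.pyRange 0 n 1).foldl (fun ft i =>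
      (PySem.List.pyRange (i + 1) n 1).foldl (fun ft j =>
        let a := PySem.List.pyGetD edge_list i (0, [])
        let b := PySem.List.pyGetD edge_list j (0, [])
        if pvTilesFit a.2 b.2 then
          -- 'if id in ft: ft[id].append(x) else: ft[id] = [x]'  =  ft[id] = ft.get(id, []) + [x]
          (ft.modify a.1 [] (fun l => l ++ [b.1])).modify b.1 [] (fun l => l ++ [a.1])
        else ft) ft) PySem.Dict.empty
  fitting_tiles.items

-- ===== PORT B =====
-- edge_map: edge string -> set of tile positions carrying it ('edge_map.setdefault(e, set()).add(k)')
def pvEdgeMap (items : List (Int × List (List String))) : PySem.Dict String (PySem.Set Int) :=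
  (PySem.List.enumerate items).foldl (fun em kt =>
    kt.2.2.foldl (fun em orientation =>
      orientation.foldl (fun em e =>
        em.modify e [] (fun s => PySem.Set.add s kt.1)) em) em) PySem.Dict.empty

-- 'while g: a = g.pop(0); for b in g: succ[a].add(b)'
def pvPairsLoop (succ : List (PySem.Set Int)) : List Int → List (PySem.Set Int)
  | [] => succ
  | a :: g =>
      pvPairsLoop
        (g.foldl (fun s b => PySem.List.pySetD s a (PySem.Set.add (PySem.List.pyGetD s a []) b)) succ) g

-- succ[i]: the set of positions j > i whose tile shares an edge string with tile i
def pvSuccFinal (items : List (Int × List (List String))) : List (PySem.Set Int) :=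
  (pvEdgeMap items).values.foldl (fun succ group =>
    pvPairsLoop succ (PySem.List.sorted group (fun x => x) false))
    (items.map (fun _ => ([] : PySem.Set Int)))

def get_fitting_tiles_alt (edges : List (Int × List (List String))) : List (Int × List Int) :=
  let items := (PySem.Dict.ofList edges).items
  let succ := pvSuccFinal items
  -- replay the adjacencies in index order ('result.setdefault(id, []).append(other)')
  let result : PySem.Dict Int (List Int) :=
    (PySem.List.pyRange 0 (items.length : Int) 1).foldl (fun res i =>
      (PySem.List.sorted (PySem.List.pyGetD succ i []) (fun x => x) false).foldl (fun res j =>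
        let a := PySem.List.pyGetD items i (0, [])
        let b := PySem.List.pyGetD items j (0, [])
        (res.modify a.1 [] (fun l => l ++ [b.1])).modify b.1 [] (fun l => l ++ [a.1])) res) PySem.Dict.empty
  result.items

-- ===== PRECONDITION & SPEC =====
def Spec_get_fitting_tiles (edges : List (Int × List (List String))) (out : List (Int × List Int)) : Prop := out = get_fitting_tiles_alt edges
instance (edges : List (Int × List (List String))) (out : List (Int × List Int)) : Decidable (Spec_get_fitting_tiles edges out) := by unfold Spec_get_fitting_tiles; infer_instance

-- ===== CLAIM (what is proved, stated in full; the proofs are below) =====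
def Claim_equal_get_fitting_tiles : Prop := ∀ (edges : List (Int × List (List String))), Dom_get_fitting_tiles edges → Spec_get_fitting_tiles edges (get_fitting_tiles edges)

-- ===== LEMMAS AND PROOFS =====

-- the edge strings of the tile at position k
def pvFlat (el : List (Int × List (List String))) (k : Nat) : List String :=
  ((el.getD k (0, [])).2).flatten

-- the positions whose tile carries edge string e, with multiplicity, in position order
def pvOcc (el : List (Int × List (List String))) (e : String) : List Int :=
  ((PySem.List.enumerate el).filter (fun kt => decide (e ∈ kt.2.2.flatten))).map (·.1)

-- one tile's strings: per-key effect of the string fold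
theorem pvE0 (ss : List String) (em : PySem.Dict String (PySem.Set Int)) (k : Int) (e : String) :
    (ss.foldl (fun em s => em.modify s [] (fun g => PySem.Set.add g k)) em).getD e []
      = if e ∈ ss then PySem.Set.add (em.getD e []) k else em.getD e [] := by
  induction ss generalizing em with
  | nil => simp
  | cons s rest ih =>
    simp only [List.foldl_cons, ih, PySem.Dict.getD_modify, List.mem_cons]
    by_cases h1 : e ∈ rest <;> by_cases h2 : e = s <;> simp [h1, h2]

-- the whole enumerate fold, per key
theorem pvE1 (l : List (Int × (Int × List (List String)))) (em : PySem.Dict String (PySem.Set Int)) (e : String) :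
    (l.foldl (fun em kt =>
        kt.2.2.foldl (fun em orientation =>
          orientation.foldl (fun em s => em.modify s [] (fun g => PySem.Set.add g kt.1)) em) em) em).getD e []
      = ((l.filter (fun kt => decide (e ∈ kt.2.2.flatten))).map (·.1)).foldl PySem.Set.add (em.getD e []) := by
  induction l generalizing em with
  | nil => simp
  | cons kt rest ih =>
    simp only [List.foldl_cons, ih]
    rw [← List.foldl_flatten, pvE0]
    by_cases h : e ∈ kt.2.2.flatten <;>
      simp only [List.filter_cons, h, decide_true, decide_false, if_true, if_false,
        List.map_cons, List.foldl_cons, Bool.false_eq_true]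

theorem pvGetD_pvEdgeMap (el : List (Int × List (List String))) (e : String) :
    (pvEdgeMap el).getD e [] = PySem.Set.ofList (pvOcc el e) := by
  rw [pvEdgeMap, pvE1, PySem.Set.ofList_eq_foldl, pvOcc]
  simp

theorem pvMem_getD_pvEdgeMap (el : List (Int × List (List String))) (e : String) (j : Int) :
    j ∈ (pvEdgeMap el).getD e [] ↔ ∃ k : Nat, k < el.length ∧ j = (k : Int) ∧ e ∈ pvFlat el k := by
  rw [pvGetD_pvEdgeMap]
  simp only [PySem.Set.mem_ofList, pvOcc, List.mem_map, List.mem_filter,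
    PySem.List.mem_enumerate_iff]
  constructor
  · rintro ⟨kt, ⟨⟨k, hk, rfl⟩, hmem⟩, rfl⟩
    refine ⟨k, hk, by simp, ?_⟩
    simp only [decide_eq_true_eq] at hmem
    simpa [pvFlat, List.getD_eq_getElem?_getD, List.getElem?_eq_getElem hk] using hmem
  · rintro ⟨k, hk, rfl, hmem⟩
    refine ⟨((k : Int), el[k]), ⟨⟨k, hk, by simp⟩, ?_⟩, rfl⟩
    simp only [decide_eq_true_eq]
    simpa [pvFlat, List.getD_eq_getElem?_getD, List.getElem?_eq_getElem hk] using hmem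

theorem pvNodup_getD_pvEdgeMap (el : List (Int × List (List String))) (e : String) :
    ((pvEdgeMap el).getD e []).Nodup := by
  rw [pvGetD_pvEdgeMap]; exact PySem.Set.nodup_ofList _

theorem pvNodup_keys_pvEdgeMap (el : List (Int × List (List String))) :
    (pvEdgeMap el).keys.Nodup := by
  rw [pvEdgeMap]
  refine List.foldlRecOn (motive := fun d : PySem.Dict String (PySem.Set Int) => (PySem.Dict.keys d).Nodup) _ _ PySem.Dict.nodup_keys_empty ?_
  intro em hem kt _
  refine List.foldlRecOn (motive := fun d : PySem.Dict String (PySem.Set Int) => (PySem.Dict.keys d).Nodup) _ _ hem ?_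
  intro em2 hem2 o _
  exact PySem.Dict.nodup_keys_foldl_modify_key o (fun e => e) [] (fun d x => fun g => PySem.Set.add g kt.1) em2 hem2

theorem pvMem_values_pvEdgeMap (el : List (Int × List (List String))) (g : PySem.Set Int) :
    g ∈ (pvEdgeMap el).values ↔ ∃ e ∈ (pvEdgeMap el).keys, g = (pvEdgeMap el).getD e [] := by
  rw [PySem.Dict.values_eq_map_keys _ (pvNodup_keys_pvEdgeMap el) []]
  simp only [List.mem_map]
  exact ⟨fun ⟨e, he, h⟩ => ⟨e, he, h.symm⟩, fun ⟨e, he, h⟩ => ⟨e, he, h.symm⟩⟩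

theorem pvGetD_mem_values (el : List (Int × List (List String))) (e : String) (j : Int)
    (hj : j ∈ (pvEdgeMap el).getD e []) :
    (pvEdgeMap el).getD e [] ∈ (pvEdgeMap el).values := by
  rw [pvMem_values_pvEdgeMap]
  refine ⟨e, ?_, rfl⟩
  by_contra hne
  rw [← PySem.Dict.get?_eq_none_iff_not_mem_keys] at hne
  rw [PySem.Dict.getD_eq_get?_getD, hne] at hj
  simp at hj

-- inner loop of pvPairsLoop: add every b of rest to succ[a]
theorem pvAddAll (rest : List Int) (succ : List (PySem.Set Int)) (a : Int)
    (ha0 : 0 ≤ a) (han : a < (succ.length : Int)) :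
    (rest.foldl (fun s b => PySem.List.pySetD s a (PySem.Set.add (PySem.List.pyGetD s a []) b)) succ).length = succ.length
    ∧ (∀ i : Int, 0 ≤ i → i < (succ.length : Int) → ∀ j : Int,
        (j ∈ PySem.List.pyGetD (rest.foldl (fun s b => PySem.List.pySetD s a (PySem.Set.add (PySem.List.pyGetD s a []) b)) succ) i []
          ↔ j ∈ PySem.List.pyGetD succ i [] ∨ (i = a ∧ j ∈ rest)))
    ∧ (∀ i : Int, 0 ≤ i → i < (succ.length : Int) → (PySem.List.pyGetD succ i []).Nodup →
        (PySem.List.pyGetD (rest.foldl (fun s b => PySem.List.pySetD s a (PySem.Set.add (PySem.List.pyGetD s a []) b)) succ) i []).Nodup) := by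
  induction rest generalizing succ with
  | nil => exact ⟨rfl, fun i _ _ j => by simp, fun i _ _ h => h⟩
  | cons b rest ih =>
    obtain ⟨aN, rfl⟩ := Int.eq_ofNat_of_zero_le ha0
    have haN : aN < succ.length := by exact_mod_cast han
    set succ' := PySem.List.pySetD succ (aN : Int) (PySem.Set.add (PySem.List.pyGetD succ (aN : Int) []) b) with hsucc'
    have hlen' : succ'.length = succ.length := PySem.List.length_pySetD _ _ _
    have hget : ∀ i : Int, 0 ≤ i → i < (succ.length : Int) →
        PySem.List.pyGetD succ' i []
          = if i = (aN : Int) then PySem.Set.add (PySem.List.pyGetD succ (aN : Int) []) b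
            else PySem.List.pyGetD succ i [] := by
      intro i hi0 hin
      obtain ⟨iN, rfl⟩ := Int.eq_ofNat_of_zero_le hi0
      rw [hsucc', PySem.List.pyGetD_pySetD_natCast _ _ _ _ _ haN]
      simp
    obtain ⟨ihlen, ihmem, ihnd⟩ := ih succ' (by rw [hlen']; exact han)
    refine ⟨by rw [List.foldl_cons, ← hsucc', ihlen, hlen'], ?_, ?_⟩
    · intro i hi0 hin j
      rw [List.foldl_cons, ← hsucc', ihmem i hi0 (by rw [hlen']; exact hin) j,
        hget i hi0 hin]
      by_cases hia : i = (aN : Int) <;>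
        (simp [hia, PySem.Set.mem_add]; try tauto)
    · intro i hi0 hin hnd
      rw [List.foldl_cons, ← hsucc']
      refine ihnd i hi0 (by rw [hlen']; exact hin) ?_
      rw [hget i hi0 hin]
      by_cases hia : i = (aN : Int)
      · rw [hia] at hnd
        simp only [hia, if_true]
        exact PySem.Set.nodup_add _ _ hnd
      · simpa [hia] using hnd

theorem pvPairsLoop_facts (g : List Int) (succ : List (PySem.Set Int))
    (hg : g.Pairwise (· < ·)) (hgb : ∀ x ∈ g, 0 ≤ x ∧ x < (succ.length : Int)) :
    (pvPairsLoop succ g).length = succ.length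
    ∧ (∀ i : Int, 0 ≤ i → i < (succ.length : Int) → ∀ j : Int,
        (j ∈ PySem.List.pyGetD (pvPairsLoop succ g) i []
          ↔ j ∈ PySem.List.pyGetD succ i [] ∨ (i ∈ g ∧ j ∈ g ∧ i < j)))
    ∧ (∀ i : Int, 0 ≤ i → i < (succ.length : Int) → (PySem.List.pyGetD succ i []).Nodup →
        (PySem.List.pyGetD (pvPairsLoop succ g) i []).Nodup) := by
  induction g generalizing succ with
  | nil => exact ⟨rfl, fun i _ _ j => by simp [pvPairsLoop], fun i _ _ h => by simpa [pvPairsLoop] using h⟩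
  | cons a rest ih =>
    obtain ⟨ha0, han⟩ := hgb a (List.mem_cons_self)
    obtain ⟨hlen1, hmem1, hnd1⟩ := pvAddAll rest succ a ha0 han
    set succ' := rest.foldl (fun s b => PySem.List.pySetD s a (PySem.Set.add (PySem.List.pyGetD s a []) b)) succ with hs'
    have hrb : ∀ x ∈ rest, 0 ≤ x ∧ x < (succ'.length : Int) := by
      intro x hx; rw [hlen1]; exact hgb x (List.mem_cons_of_mem _ hx)
    have halt : ∀ x ∈ rest, a < x := fun x hx => (List.pairwise_cons.mp hg).1 x hx
    obtain ⟨ihlen, ihmem, ihnd⟩ := ih succ' (List.pairwise_cons.mp hg).2 hrb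
    refine ⟨by rw [pvPairsLoop, ihlen, hlen1], ?_, ?_⟩
    · intro i hi0 hin j
      rw [pvPairsLoop, ihmem i hi0 (by rw [hlen1]; exact hin) j, hmem1 i hi0 hin]
      constructor
      · rintro (((h | ⟨rfl, hj⟩) | ⟨hi, hj, hij⟩))
        · exact Or.inl h
        · exact Or.inr ⟨List.mem_cons_self, List.mem_cons_of_mem _ hj, halt j hj⟩
        · exact Or.inr ⟨List.mem_cons_of_mem _ hi, List.mem_cons_of_mem _ hj, hij⟩
      · rintro (h | ⟨hi, hj, hij⟩)
        · exact Or.inl (Or.inl h)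
        · rcases List.mem_cons.mp hj with hja | hjr
          · rcases List.mem_cons.mp hi with hia | hir
            · omega
            · have := halt i hir; omega
          · rcases List.mem_cons.mp hi with hia | hir
            · exact Or.inl (Or.inr ⟨hia, hjr⟩)
            · exact Or.inr ⟨hir, hjr, hij⟩
    · intro i hi0 hin hnd
      rw [pvPairsLoop]
      exact ihnd i hi0 (by rw [hlen1]; exact hin) (hnd1 i hi0 hin hnd)

-- the fold over all groups
theorem pvGroupsFold (L : List (PySem.Set Int)) (succ : List (PySem.Set Int))
    (hL : ∀ g ∈ L, g.Nodup ∧ ∀ x ∈ g, 0 ≤ x ∧ x < (succ.length : Int)) :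
    (L.foldl (fun succ group => pvPairsLoop succ (PySem.List.sorted group (fun x => x) false)) succ).length = succ.length
    ∧ (∀ i : Int, 0 ≤ i → i < (succ.length : Int) → ∀ j : Int,
        (j ∈ PySem.List.pyGetD (L.foldl (fun succ group => pvPairsLoop succ (PySem.List.sorted group (fun x => x) false)) succ) i []
          ↔ j ∈ PySem.List.pyGetD succ i [] ∨ ∃ g ∈ L, i ∈ g ∧ j ∈ g ∧ i < j))
    ∧ (∀ i : Int, 0 ≤ i → i < (succ.length : Int) → (PySem.List.pyGetD succ i []).Nodup →
        (PySem.List.pyGetD (L.foldl (fun succ group => pvPairsLoop succ (PySem.List.sorted group (fun x => x) false)) succ) i []).Nodup) := by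
  induction L generalizing succ with
  | nil => exact ⟨rfl, fun i _ _ j => by simp, fun i _ _ h => h⟩
  | cons g L ih =>
    obtain ⟨hgnd, hgb⟩ := hL g List.mem_cons_self
    have hsnd : (PySem.List.sorted g (fun x => x) false).Nodup :=
      (PySem.List.sorted_perm g (fun x => x) false).nodup_iff.mpr hgnd
    have hsle : (PySem.List.sorted g (fun x => x) false).Pairwise (· ≤ ·) :=
      PySem.List.sorted_pairwise g (fun x => x)
    have hslt : (PySem.List.sorted g (fun x => x) false).Pairwise (· < ·) := by
      have := List.Pairwise.and hsle hsnd
      exact this.imp (fun h => lt_of_le_of_ne h.1 h.2)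
    have hsb : ∀ x ∈ PySem.List.sorted g (fun x => x) false, 0 ≤ x ∧ x < (succ.length : Int) := by
      intro x hx
      exact hgb x ((PySem.List.mem_sorted g (fun x => x) false x).mp hx)
    obtain ⟨plen, pmem, pnd⟩ := pvPairsLoop_facts _ succ hslt hsb
    set succ' := pvPairsLoop succ (PySem.List.sorted g (fun x => x) false) with hs'
    have hL' : ∀ g' ∈ L, g'.Nodup ∧ ∀ x ∈ g', 0 ≤ x ∧ x < (succ'.length : Int) := by
      intro g' hg'
      obtain ⟨h1, h2⟩ := hL g' (List.mem_cons_of_mem _ hg')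
      exact ⟨h1, by rw [plen]; exact h2⟩
    obtain ⟨ihlen, ihmem, ihnd⟩ := ih succ' hL'
    refine ⟨by rw [List.foldl_cons, ← hs', ihlen, plen], ?_, ?_⟩
    · intro i hi0 hin j
      rw [List.foldl_cons, ← hs', ihmem i hi0 (by rw [plen]; exact hin) j,
        pmem i hi0 hin]
      simp only [PySem.List.mem_sorted, List.mem_cons]
      constructor
      · rintro ((h | ⟨hi, hj, hij⟩) | ⟨g', hg', hi, hj, hij⟩)
        · exact Or.inl h
        · exact Or.inr ⟨g, Or.inl rfl, hi, hj, hij⟩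
        · exact Or.inr ⟨g', Or.inr hg', hi, hj, hij⟩
      · rintro (h | ⟨g', hg' | hg', hi, hj, hij⟩)
        · exact Or.inl (Or.inl h)
        · exact Or.inl (Or.inr ⟨by rwa [← hg'] , by rwa [← hg'], hij⟩)
        · exact Or.inr ⟨g', hg', hi, hj, hij⟩
    · intro i hi0 hin hnd
      rw [List.foldl_cons, ← hs']
      exact ihnd i hi0 (by rw [plen]; exact hin) (pnd i hi0 hin hnd)

theorem pvSucc0_getD (el : List (Int × List (List String))) (i : Int) (hi0 : 0 ≤ i) :
    PySem.List.pyGetD (el.map (fun _ => ([] : PySem.Set Int))) i [] = [] := by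
  rw [PySem.List.pyGetD_of_nonneg _ _ hi0]
  rcases Nat.lt_or_ge i.toNat (el.map (fun _ => ([] : PySem.Set Int))).length with h | h
  · rw [List.getD_eq_getElem _ _ h]; simp
  · rw [List.getD_eq_default _ _ h]

theorem pvValuesOK (el : List (Int × List (List String))) :
    ∀ g ∈ (pvEdgeMap el).values, g.Nodup ∧ ∀ x ∈ g,
      0 ≤ x ∧ x < ((el.map (fun _ => ([] : PySem.Set Int))).length : Int) := by
  intro g hg
  obtain ⟨e, -, rfl⟩ := (pvMem_values_pvEdgeMap el g).mp hg
  refine ⟨pvNodup_getD_pvEdgeMap el e, ?_⟩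
  intro x hx
  obtain ⟨k, hk, rfl, -⟩ := (pvMem_getD_pvEdgeMap el e x).mp hx
  simp only [List.length_map]
  exact ⟨Int.natCast_nonneg k, by exact_mod_cast hk⟩

theorem pvMem_succFinal (el : List (Int × List (List String))) (i j : Int)
    (hi0 : 0 ≤ i) (hin : i < (el.length : Int)) :
    j ∈ PySem.List.pyGetD (pvSuccFinal el) i []
      ↔ i < j ∧ j < (el.length : Int) ∧ ∃ s, s ∈ pvFlat el i.toNat ∧ s ∈ pvFlat el j.toNat := by
  have hlen : ((el.map (fun _ => ([] : PySem.Set Int))).length : Int) = (el.length : Int) := by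
    simp
  rw [pvSuccFinal, (pvGroupsFold _ _ (pvValuesOK el)).2.1 i hi0 (by rw [hlen]; exact hin) j,
    pvSucc0_getD el i hi0]
  simp only [List.not_mem_nil, false_or]
  constructor
  · rintro ⟨g, hg, hig, hjg, hij⟩
    obtain ⟨e, -, rfl⟩ := (pvMem_values_pvEdgeMap el g).mp hg
    obtain ⟨ki, hki, hkieq, hei⟩ := (pvMem_getD_pvEdgeMap el e i).mp hig
    obtain ⟨kj, hkj, hkjeq, hej⟩ := (pvMem_getD_pvEdgeMap el e j).mp hjg
    subst hkieq; subst hkjeq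
    refine ⟨hij, by exact_mod_cast hkj, e, ?_, ?_⟩
    · simpa using hei
    · simpa using hej
  · rintro ⟨hij, hjn, s, hsi, hsj⟩
    have hj0 : 0 ≤ j := le_of_lt (lt_of_le_of_lt hi0 hij)
    have hmi : i ∈ (pvEdgeMap el).getD s [] := by
      rw [pvMem_getD_pvEdgeMap]
      exact ⟨i.toNat, by omega, by omega, hsi⟩
    have hmj : j ∈ (pvEdgeMap el).getD s [] := by
      rw [pvMem_getD_pvEdgeMap]
      exact ⟨j.toNat, by omega, by omega, hsj⟩
    exact ⟨_, pvGetD_mem_values el s i hmi, hmi, hmj, hij⟩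

theorem pvNodup_succFinal (el : List (Int × List (List String))) (i : Int)
    (hi0 : 0 ≤ i) (hin : i < (el.length : Int)) :
    (PySem.List.pyGetD (pvSuccFinal el) i []).Nodup := by
  rw [pvSuccFinal]
  refine (pvGroupsFold _ _ (pvValuesOK el)).2.2 i hi0 (by simpa using hin) ?_
  rw [pvSucc0_getD el i hi0]
  exact List.nodup_nil

theorem pvTilesFit_iff (ta tb : List (List String)) :
    pvTilesFit ta tb = true ↔ ∃ s, s ∈ ta.flatten ∧ s ∈ tb.flatten := by
  simp [pvTilesFit, List.any_eq_true, List.mem_flatten]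
  aesop

theorem pvSorted_succ_eq (el : List (Int × List (List String))) (i : Int)
    (hi0 : 0 ≤ i) (hin : i < (el.length : Int)) :
    PySem.List.sorted (PySem.List.pyGetD (pvSuccFinal el) i []) (fun x => x) false
      = (PySem.List.pyRange (i + 1) (el.length : Int) 1).filter
          (fun j => pvTilesFit (PySem.List.pyGetD el i ((0:Int), ([] : List (List String)))).2
                              (PySem.List.pyGetD el j ((0:Int), ([] : List (List String)))).2) := by
  apply PySem.List.sorted_eq_of_perm_of_pairwise_lt
  · rw [List.perm_ext_iff_of_nodup
      (((PySem.List.pairwise_lt_pyRange_one _ _).filter _).imp ne_of_lt)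
      (pvNodup_succFinal el i hi0 hin)]
    intro j
    rw [List.mem_filter, PySem.List.mem_pyRange_one, pvMem_succFinal el i j hi0 hin]
    have hflat : ∀ m : Int, 0 ≤ m →
        (PySem.List.pyGetD el m ((0:Int), ([] : List (List String)))).2.flatten = pvFlat el m.toNat := by
      intro m hm
      rw [PySem.List.pyGetD_of_nonneg _ _ hm, pvFlat]
    constructor
    · rintro ⟨⟨h1, h2⟩, hfit⟩
      refine ⟨by omega, h2, ?_⟩
      obtain ⟨s, hs1, hs2⟩ := (pvTilesFit_iff _ _).mp hfit
      exact ⟨s, by rwa [hflat i hi0] at hs1, by rwa [hflat j (by omega)] at hs2⟩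
    · rintro ⟨h1, h2, s, hs1, hs2⟩
      refine ⟨⟨by omega, h2⟩, (pvTilesFit_iff _ _).mpr ⟨s, ?_, ?_⟩⟩
      · rwa [hflat i hi0]
      · rwa [hflat j (by omega)]
  · exact (PySem.List.pairwise_lt_pyRange_one _ _).filter _

-- ===== VERDICT (by name: the statement is the Claim_ definition above) =====
theorem get_fitting_tiles_spec : Claim_equal_get_fitting_tiles := by
  intro edges _
  unfold Spec_get_fitting_tiles
  simp only [get_fitting_tiles, get_fitting_tiles_alt]
  congr 1
  apply PySem.List.foldl_congr_mem
  intro acc i hi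
  obtain ⟨hi0, hin⟩ := PySem.List.mem_pyRange_one.mp hi
  rw [pvSorted_succ_eq _ i hi0 (by simpa using hin), List.foldl_filter]
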